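-- pv_equiv track=rewrite | github.com/jiejieje/GenerativeAgents-Alien-Town | tiled_to_maze.py | build_location_hierarchy
-- ===== SOURCE A (Python) =====
-- def build_location_hierarchy(locations):
--     hierarchy = {}
--     processed = set()
--
--     # 按数字前缀分组
--     prefix_1_locations = {k:v for k,v in locations.items() if k.startswith("1")}
--     prefix_2_locations = {k:v for k,v in locations.items() if k.startswith("2")}
--     prefix_3_locations = {k:v for k,v in locations.items() if k.startswith("3")}
--
--     # 构建层级关系
--     for loc1_name, coords1 in prefix_1_locations.items():
--         hierarchy[loc1_name] = {}
--         processed.add(loc1_name)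
--
--         # 查找相交的2级区域
--         for loc2_name, coords2 in prefix_2_locations.items():
--             if loc2_name in processed:
--                 continue
--
--             # 如果有重叠（使用更宽松的判断）
--             if len(coords1.intersection(coords2)) > 0:
--                 hierarchy[loc1_name][loc2_name] = []
--                 processed.add(loc2_name)
--
--                 # 查找相交的3级物体
--                 for loc3_name, coords3 in prefix_3_locations.items():
--                     if loc3_name in processed:
--                         continue
--
--                     if len(coords2.intersection(coords3)) > 0:
--                         hierarchy[loc1_name][loc2_name].append(loc3_name)
--                         processed.add(loc3_name)
--
--     return hierarchy
-- ===== SOURCE B (Python) =====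
-- def build_location_hierarchy(locations):
--     l1 = [(k, v) for k, v in locations.items() if k.startswith("1")]
--     l2 = [(k, v) for k, v in locations.items() if k.startswith("2")]
--     l3 = [(k, v) for k, v in locations.items() if k.startswith("3")]
--     # inverted indexes: coordinate -> set of region names containing it
--     idx2 = {}
--     for name, coords in l2:
--         for c in coords:
--             idx2.setdefault(c, set()).add(name)
--     idx3 = {}
--     for name, coords in l3:
--         for c in coords:
--             idx3.setdefault(c, set()).add(name)
--     empty = frozenset()
--     assigned = set()
--     hierarchy = {}
--     for n1, c1 in l1:
--         hits2 = set().union(*(idx2.get(c, empty) for c in c1))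
--         sub = {}
--         for n2, c2 in l2:
--             if n2 in hits2 and n2 not in assigned:
--                 assigned.add(n2)
--                 hits3 = set().union(*(idx3.get(c, empty) for c in c2))
--                 kids = [n3 for n3, _ in l3 if n3 in hits3 and n3 not in assigned]
--                 assigned.update(kids)
--                 sub[n2] = kids
--         hierarchy[n1] = sub
--     return hierarchy
-- ===== Notes on version B (the rewrite author's own statement) =====
-- stated objective: alternative
-- what changed: Instead of computing a coordinate-set intersection for every (level-1, level-2) and (level-2, level-3) pair, B builds two inverted coordinate->region-name indexes once and gathers each region's overlap candidates as a hit set, so each pair test becomes a membership check; it trades per-pair intersections for index construction over all coordinates.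
import Mathlib
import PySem

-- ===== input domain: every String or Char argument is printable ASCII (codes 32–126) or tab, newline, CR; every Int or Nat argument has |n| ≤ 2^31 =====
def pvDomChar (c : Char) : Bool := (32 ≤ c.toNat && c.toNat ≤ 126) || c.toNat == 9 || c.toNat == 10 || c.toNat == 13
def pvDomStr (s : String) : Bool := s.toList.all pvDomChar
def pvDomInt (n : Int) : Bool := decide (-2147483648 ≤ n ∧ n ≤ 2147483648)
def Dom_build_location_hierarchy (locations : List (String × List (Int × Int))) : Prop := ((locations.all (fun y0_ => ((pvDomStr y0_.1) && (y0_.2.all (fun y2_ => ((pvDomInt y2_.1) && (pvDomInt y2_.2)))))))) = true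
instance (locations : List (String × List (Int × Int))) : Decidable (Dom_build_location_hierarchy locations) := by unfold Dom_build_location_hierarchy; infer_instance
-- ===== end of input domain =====

-- B replaces A's per-pair coordinate-set intersections by inverted coordinate→region-name indexes
-- built once, from which each region gathers its overlap candidates as a hit set; objective: alternative algorithm.

-- ===== PORT A =====
-- len(coords1.intersection(coords2)) > 0
def pvOverlap (c1 c2 : List (Int × Int)) : Bool :=
  decide (0 < PySem.Set.len (PySem.Set.inter (PySem.Set.ofList c1) (PySem.Set.ofList c2)))

-- A's innermost loop body: for loc3_name, coords3 in prefix_3_locations.items(): …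
def pvLoop3 (c2 : List (Int × Int)) (st : List String × PySem.Set String)
    (kv : String × List (Int × Int)) : List String × PySem.Set String :=
  if PySem.Set.contains st.2 kv.1 then st
  else if pvOverlap c2 kv.2 then (st.1 ++ [kv.1], PySem.Set.add st.2 kv.1)
  else st

-- A's middle loop body: for loc2_name, coords2 in prefix_2_locations.items(): …
def pvLoop2 (p3 : List (String × List (Int × Int))) (c1 : List (Int × Int))
    (st : List (String × List String) × PySem.Set String)
    (kv : String × List (Int × Int)) : List (String × List String) × PySem.Set String :=
  if PySem.Set.contains st.2 kv.1 then st
  else if pvOverlap c1 kv.2 then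
    let inner := p3.foldl (pvLoop3 kv.2) ([], PySem.Set.add st.2 kv.1)
    (st.1 ++ [(kv.1, inner.1)], inner.2)
  else st

-- A's outer loop body: for loc1_name, coords1 in prefix_1_locations.items(): …
def pvLoop1 (p2 p3 : List (String × List (Int × Int)))
    (st : List (String × List (String × List String)) × PySem.Set String)
    (kv : String × List (Int × Int)) :
    List (String × List (String × List String)) × PySem.Set String :=
  let inner := p2.foldl (pvLoop2 p3 kv.2) ([], PySem.Set.add st.2 kv.1)
  (st.1 ++ [(kv.1, inner.1)], inner.2)

def build_location_hierarchy (locations : List (String × List (Int × Int))) :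
    List (String × List (String × List String)) :=
  let d := PySem.Dict.ofList locations
  let p1 := d.items.filter (fun kv => PySem.Str.startswith kv.1 "1")
  let p2 := d.items.filter (fun kv => PySem.Str.startswith kv.1 "2")
  let p3 := d.items.filter (fun kv => PySem.Str.startswith kv.1 "3")
  (p1.foldl (pvLoop1 p2 p3) ([], PySem.Set.empty)).1

-- ===== PORT B =====
-- inverted index: coordinate -> set of region names containing it (idx.setdefault(c, set()).add(name))
def pvIndex (l : List (String × List (Int × Int))) : PySem.Dict (Int × Int) (PySem.Set String) :=
  l.foldl
    (fun d kv => kv.2.foldl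
      (fun d c => d.modify c PySem.Set.empty (fun s => PySem.Set.add s kv.1)) d)
    PySem.Dict.empty

-- hits = set().union(*(idx.get(c, empty) for c in coords))
def pvHits (idx : PySem.Dict (Int × Int) (PySem.Set String)) (coords : List (Int × Int)) :
    PySem.Set String :=
  coords.foldl (fun h c => PySem.Set.union h (idx.getD c PySem.Set.empty)) PySem.Set.empty

-- B's level-2 loop body: assign an unassigned hit, then collect its unassigned level-3 hits
def pvAltStep2 (l3 : List (String × List (Int × Int)))
    (idx3 : PySem.Dict (Int × Int) (PySem.Set String)) (hits2 : PySem.Set String)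
    (st2 : List (String × List String) × PySem.Set String)
    (kv2 : String × List (Int × Int)) : List (String × List String) × PySem.Set String :=
  if PySem.Set.contains hits2 kv2.1 && !PySem.Set.contains st2.2 kv2.1 then
    let assigned := PySem.Set.add st2.2 kv2.1
    let hits3 := pvHits idx3 kv2.2
    let kids := (l3.filter (fun kv3 =>
        PySem.Set.contains hits3 kv3.1 && !PySem.Set.contains assigned kv3.1)).map (·.1)
    (st2.1 ++ [(kv2.1, kids)], PySem.Set.update assigned kids)
  else st2

-- B's level-1 loop body
def pvAltStep1 (l2 l3 : List (String × List (Int × Int)))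
    (idx2 idx3 : PySem.Dict (Int × Int) (PySem.Set String))
    (st : List (String × List (String × List String)) × PySem.Set String)
    (kv : String × List (Int × Int)) :
    List (String × List (String × List String)) × PySem.Set String :=
  let hits2 := pvHits idx2 kv.2
  let inner := l2.foldl (pvAltStep2 l3 idx3 hits2) ([], st.2)
  (st.1 ++ [(kv.1, inner.1)], inner.2)

def build_location_hierarchy_alt (locations : List (String × List (Int × Int))) :
    List (String × List (String × List String)) :=
  let d := PySem.Dict.ofList locations
  let l1 := d.items.filter (fun kv => PySem.Str.startswith kv.1 "1")
  let l2 := d.items.filter (fun kv => PySem.Str.startswith kv.1 "2")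
  let l3 := d.items.filter (fun kv => PySem.Str.startswith kv.1 "3")
  let idx2 := pvIndex l2
  let idx3 := pvIndex l3
  (l1.foldl (pvAltStep1 l2 l3 idx2 idx3) ([], PySem.Set.empty)).1

-- ===== PRECONDITION & SPEC =====
def Spec_build_location_hierarchy (locations : List (String × List (Int × Int))) (out : List (String × List (String × List String))) : Prop := out = build_location_hierarchy_alt locations
instance (locations : List (String × List (Int × Int))) (out : List (String × List (String × List String))) : Decidable (Spec_build_location_hierarchy locations out) := by unfold Spec_build_location_hierarchy; infer_instance

-- ===== CLAIM (what is proved, stated in full; the proofs are below) =====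
def Claim_equal_build_location_hierarchy : Prop := ∀ (locations : List (String × List (Int × Int))), Dom_build_location_hierarchy locations → Spec_build_location_hierarchy locations (build_location_hierarchy locations)

-- ===== LEMMAS AND PROOFS =====

-- a string starting with the one-character prefix a does not start with b ≠ a
lemma pv_sw_ne (s : String) (a b : Char)
    (h : PySem.Str.startswith s (String.ofList [a]) = true) (hne : a ≠ b) :
    PySem.Str.startswith s (String.ofList [b]) = false := by
  simp only [PySem.Str.startswith, String.toList_ofList] at h ⊢
  cases hs : s.toList with
  | nil => rw [hs] at h; simp [PySem.Chars.startswith, List.isPrefixOf] at h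
  | cons x xs =>
    rw [hs] at h
    simp [PySem.Chars.startswith, List.isPrefixOf] at h ⊢
    subst h; exact fun hb => hne hb.symm

lemma pv_overlap_iff (c1 c2 : List (Int × Int)) :
    pvOverlap c1 c2 = true ↔ ∃ c ∈ c1, c ∈ c2 := by
  unfold pvOverlap
  rw [decide_eq_true_iff]
  constructor
  · intro h
    have hne : (PySem.Set.inter (PySem.Set.ofList c1) (PySem.Set.ofList c2)) ≠ [] := by
      intro he; simp [PySem.Set.len, he] at h
    obtain ⟨y, hy⟩ := List.exists_mem_of_ne_nil _ hne
    have hm := (PySem.Set.mem_inter _ _ y).mp hy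
    exact ⟨y, (PySem.Set.mem_ofList _ _).mp hm.1, (PySem.Set.mem_ofList _ _).mp hm.2⟩
  · rintro ⟨c, h1, h2⟩
    have hm : c ∈ PySem.Set.inter (PySem.Set.ofList c1) (PySem.Set.ofList c2) :=
      (PySem.Set.mem_inter _ _ c).mpr
        ⟨(PySem.Set.mem_ofList _ _).mpr h1, (PySem.Set.mem_ofList _ _).mpr h2⟩
    have hlen := List.length_pos_of_mem hm
    simp [PySem.Set.len]
    omega

-- getD of the coordinate loop of pvIndex for one region
lemma pv_index_inner (n : String) (cs : List (Int × Int))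
    (d : PySem.Dict (Int × Int) (PySem.Set String)) (c : Int × Int) :
    (cs.foldl (fun d c' => d.modify c' PySem.Set.empty (fun s => PySem.Set.add s n)) d).getD c PySem.Set.empty
      = if c ∈ cs then PySem.Set.add (d.getD c PySem.Set.empty) n else d.getD c PySem.Set.empty := by
  induction cs generalizing d with
  | nil => simp
  | cons c' rest ih =>
    simp only [List.foldl_cons, ih, PySem.Dict.getD_modify]
    by_cases h1 : c = c' <;> by_cases h2 : c ∈ rest <;> simp [h1, h2]

lemma pv_index_mem (l : List (String × List (Int × Int))) (c : Int × Int) (m : String)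
    (d : PySem.Dict (Int × Int) (PySem.Set String)) :
    m ∈ (l.foldl (fun d kv => kv.2.foldl
        (fun d c' => d.modify c' PySem.Set.empty (fun s => PySem.Set.add s kv.1)) d) d).getD c PySem.Set.empty
      ↔ m ∈ d.getD c PySem.Set.empty ∨ ∃ kv ∈ l, kv.1 = m ∧ c ∈ kv.2 := by
  induction l generalizing d with
  | nil => simp
  | cons kv rest ih =>
    simp only [List.foldl_cons, ih, pv_index_inner]
    by_cases h : c ∈ kv.2 <;> simp [h, PySem.Set.mem_add] <;> tauto

lemma pv_hits_mem (idx : PySem.Dict (Int × Int) (PySem.Set String)) (coords : List (Int × Int)) (m : String) :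
    m ∈ pvHits idx coords ↔ ∃ c ∈ coords, m ∈ idx.getD c PySem.Set.empty := by
  have key : ∀ (cds : List (Int × Int)) (h0 : PySem.Set String),
      m ∈ cds.foldl (fun h c => PySem.Set.union h (idx.getD c PySem.Set.empty)) h0
      ↔ m ∈ h0 ∨ ∃ c ∈ cds, m ∈ idx.getD c PySem.Set.empty := by
    intro cds
    induction cds with
    | nil => simp
    | cons c rest ih =>
      intro h0
      rw [List.foldl_cons, ih, PySem.Set.mem_union]
      simp
      tauto
  rw [pvHits, key]
  simp

-- for a key of a nodup-keyed list, membership in the gathered hit set is exactly overlap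
lemma pv_hits_iff_overlap (l : List (String × List (Int × Int)))
    (hnd : (l.map (·.1)).Nodup) (kv : String × List (Int × Int)) (hkv : kv ∈ l)
    (cs : List (Int × Int)) :
    kv.1 ∈ pvHits (pvIndex l) cs ↔ pvOverlap cs kv.2 = true := by
  rw [pv_hits_mem, pv_overlap_iff]
  constructor
  · rintro ⟨c, hc, hm⟩
    rw [pvIndex, pv_index_mem] at hm
    rcases hm with h | ⟨kv', hkv', heq, hc'⟩
    · simp [PySem.Dict.getD_empty] at h
    · have hkvv : kv' = kv := (List.inj_on_of_nodup_map hnd) hkv' hkv heq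
      subst hkvv
      exact ⟨c, hc, hc'⟩
  · rintro ⟨c, hc, hc2⟩
    refine ⟨c, hc, ?_⟩
    rw [pvIndex, pv_index_mem]
    exact Or.inr ⟨kv, hkv, rfl, hc2⟩

-- the state relation: A's processed and B's assigned sets agree on every name that does not
-- start with "1" (A additionally stores the level-1 names, B does not)
def pvRel (pA pB : PySem.Set String) : Prop :=
  ∀ s : String, PySem.Str.startswith s "1" = false → (s ∈ pA ↔ s ∈ pB)

lemma pv_rel_add (pA pB : PySem.Set String) (h : pvRel pA pB) (x : String) :
    pvRel (PySem.Set.add pA x) (PySem.Set.add pB x) := by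
  intro s hs
  rw [PySem.Set.mem_add, PySem.Set.mem_add, h s hs]

lemma pv_rel_add1 (pA pB : PySem.Set String) (h : pvRel pA pB) (x : String)
    (hx : PySem.Str.startswith x "1" = true) :
    pvRel (PySem.Set.add pA x) pB := by
  intro s hs
  rw [PySem.Set.mem_add, h s hs]
  constructor
  · rintro (h' | rfl)
    · exact h'
    · rw [hx] at hs; cases hs
  · exact Or.inl

-- A's innermost loop versus B's filtered list comprehension + one update
lemma pv_inner_eq (c2 : List (Int × Int)) (hits3 : PySem.Set String)
    (p3 : List (String × List (Int × Int)))
    (hnd : (p3.map (·.1)).Nodup)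
    (hsw : ∀ kv ∈ p3, PySem.Str.startswith kv.1 "1" = false)
    (hh : ∀ kv ∈ p3, (kv.1 ∈ hits3 ↔ pvOverlap c2 kv.2 = true)) :
    ∀ (acc : List String) (pA pB : PySem.Set String), pvRel pA pB →
      (p3.foldl (pvLoop3 c2) (acc, pA)).1
        = acc ++ (p3.filter (fun kv3 =>
            PySem.Set.contains hits3 kv3.1 && !PySem.Set.contains pB kv3.1)).map (·.1)
      ∧ pvRel (p3.foldl (pvLoop3 c2) (acc, pA)).2
          (PySem.Set.update pB ((p3.filter (fun kv3 =>
            PySem.Set.contains hits3 kv3.1 && !PySem.Set.contains pB kv3.1)).map (·.1))) := by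
  induction p3 with
  | nil => intro acc pA pB hrel; simpa using hrel
  | cons kv rest ih =>
    intro acc pA pB hrel
    simp only [List.map_cons, List.nodup_cons] at hnd
    have hsw1 := hsw kv (List.mem_cons_self ..)
    have hh1 := hh kv (List.mem_cons_self ..)
    have ih' := ih hnd.2 (fun x hx => hsw x (List.mem_cons_of_mem _ hx))
      (fun x hx => hh x (List.mem_cons_of_mem _ hx))
    by_cases hm : kv.1 ∈ pA
    · have hmB : kv.1 ∈ pB := (hrel kv.1 hsw1).mp hm
      have hA : PySem.Set.contains pA kv.1 = true := (PySem.Set.contains_iff _ _).mpr hm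
      have hB : PySem.Set.contains pB kv.1 = true := (PySem.Set.contains_iff _ _).mpr hmB
      simp only [List.foldl_cons, List.filter_cons, pvLoop3, hA, hB, Bool.not_true,
        Bool.and_false, if_true]
      exact ih' acc pA pB hrel
    · have hmB : kv.1 ∉ pB := fun h => hm ((hrel kv.1 hsw1).mpr h)
      have hA : PySem.Set.contains pA kv.1 = false := by
        rw [← Bool.not_eq_true, PySem.Set.contains_iff]; exact hm
      have hB : PySem.Set.contains pB kv.1 = false := by
        rw [← Bool.not_eq_true, PySem.Set.contains_iff]; exact hmB
      by_cases hov : pvOverlap c2 kv.2 = true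
      · have hhit : PySem.Set.contains hits3 kv.1 = true :=
          (PySem.Set.contains_iff _ _).mpr (hh1.mpr hov)
        simp only [List.foldl_cons, List.filter_cons, pvLoop3, hA, hB, hov, hhit,
          Bool.not_false, Bool.and_true, if_false, if_true, Bool.false_eq_true]
        have hrel' := pv_rel_add pA pB hrel kv.1
        obtain ⟨h1, h2⟩ := ih' (acc ++ [kv.1]) (PySem.Set.add pA kv.1) (PySem.Set.add pB kv.1) hrel'
        have hfcong : rest.filter (fun kv3 =>
              PySem.Set.contains hits3 kv3.1 && !PySem.Set.contains (PySem.Set.add pB kv.1) kv3.1)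
            = rest.filter (fun kv3 =>
              PySem.Set.contains hits3 kv3.1 && !PySem.Set.contains pB kv3.1) := by
          apply List.filter_congr
          intro x hx
          have hxne : x.1 ≠ kv.1 := by
            intro he; exact hnd.1 (he ▸ List.mem_map_of_mem hx)
          simp [PySem.Set.mem_add, hxne]
        constructor
        · rw [h1, hfcong]; simp
        · rw [hfcong] at h2
          rw [List.map_cons, PySem.Set.update_cons]
          exact h2
      · have hov' : pvOverlap c2 kv.2 = false := by
          rw [← Bool.not_eq_true]; exact hov
        have hhit : PySem.Set.contains hits3 kv.1 = false := by
          rw [← Bool.not_eq_true, PySem.Set.contains_iff]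
          exact fun h => hov (hh1.mp h)
        simp only [List.foldl_cons, List.filter_cons, pvLoop3, hA, hB, hov', hhit,
          Bool.false_and, if_false, Bool.false_eq_true]
        exact ih' acc pA pB hrel

-- A's middle loop versus B's
lemma pv_middle_eq (p3 : List (String × List (Int × Int)))
    (idx3 : PySem.Dict (Int × Int) (PySem.Set String))
    (c1 : List (Int × Int)) (hits2 : PySem.Set String)
    (h3nd : (p3.map (·.1)).Nodup)
    (h3sw : ∀ kv ∈ p3, PySem.Str.startswith kv.1 "1" = false)
    (h3h : ∀ kv ∈ p3, ∀ cs, (kv.1 ∈ pvHits idx3 cs ↔ pvOverlap cs kv.2 = true))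
    (p2 : List (String × List (Int × Int)))
    (h2sw : ∀ kv ∈ p2, PySem.Str.startswith kv.1 "1" = false)
    (h2h : ∀ kv ∈ p2, (kv.1 ∈ hits2 ↔ pvOverlap c1 kv.2 = true)) :
    ∀ (sub : List (String × List String)) (pA pB : PySem.Set String), pvRel pA pB →
      (p2.foldl (pvLoop2 p3 c1) (sub, pA)).1
        = (p2.foldl (pvAltStep2 p3 idx3 hits2) (sub, pB)).1
      ∧ pvRel (p2.foldl (pvLoop2 p3 c1) (sub, pA)).2
          (p2.foldl (pvAltStep2 p3 idx3 hits2) (sub, pB)).2 := by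
  induction p2 with
  | nil => intro sub pA pB hrel; exact ⟨rfl, hrel⟩
  | cons kv rest ih =>
    intro sub pA pB hrel
    have hsw1 := h2sw kv (List.mem_cons_self ..)
    have hh1 := h2h kv (List.mem_cons_self ..)
    have ih' := ih (fun x hx => h2sw x (List.mem_cons_of_mem _ hx))
      (fun x hx => h2h x (List.mem_cons_of_mem _ hx))
    by_cases hm : kv.1 ∈ pA
    · have hmB : kv.1 ∈ pB := (hrel kv.1 hsw1).mp hm
      have hA : PySem.Set.contains pA kv.1 = true := (PySem.Set.contains_iff _ _).mpr hm
      have hB : PySem.Set.contains pB kv.1 = true := (PySem.Set.contains_iff _ _).mpr hmB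
      simp only [List.foldl_cons, pvLoop2, pvAltStep2, hA, hB, Bool.not_true, Bool.and_false,
        if_true]
      exact ih' sub pA pB hrel
    · have hmB : kv.1 ∉ pB := fun h => hm ((hrel kv.1 hsw1).mpr h)
      have hA : PySem.Set.contains pA kv.1 = false := by
        rw [← Bool.not_eq_true, PySem.Set.contains_iff]; exact hm
      have hB : PySem.Set.contains pB kv.1 = false := by
        rw [← Bool.not_eq_true, PySem.Set.contains_iff]; exact hmB
      by_cases hov : pvOverlap c1 kv.2 = true
      · have hhit : PySem.Set.contains hits2 kv.1 = true :=
          (PySem.Set.contains_iff _ _).mpr (hh1.mpr hov)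
        simp only [List.foldl_cons, pvLoop2, pvAltStep2, hA, hB, hov, hhit, Bool.not_false,
          Bool.and_true, if_false, if_true, Bool.false_eq_true]
        have hrel' := pv_rel_add pA pB hrel kv.1
        obtain ⟨h1, h2⟩ := pv_inner_eq kv.2 (pvHits idx3 kv.2) p3 h3nd h3sw
          (fun x hx => h3h x hx kv.2) [] (PySem.Set.add pA kv.1) (PySem.Set.add pB kv.1) hrel'
        rw [List.nil_append] at h1
        rw [h1]
        exact ih' _ _ _ h2
      · have hov' : pvOverlap c1 kv.2 = false := by
          rw [← Bool.not_eq_true]; exact hov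
        have hhit : PySem.Set.contains hits2 kv.1 = false := by
          rw [← Bool.not_eq_true, PySem.Set.contains_iff]
          exact fun h => hov (hh1.mp h)
        simp only [List.foldl_cons, pvLoop2, pvAltStep2, hA, hB, hov', hhit, Bool.false_and,
          if_false, Bool.false_eq_true]
        exact ih' sub pA pB hrel

-- A's outer loop versus B's
lemma pv_top_eq (p2 p3 : List (String × List (Int × Int)))
    (idx2 idx3 : PySem.Dict (Int × Int) (PySem.Set String))
    (h3nd : (p3.map (·.1)).Nodup)
    (h3sw : ∀ kv ∈ p3, PySem.Str.startswith kv.1 "1" = false)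
    (h3h : ∀ kv ∈ p3, ∀ cs, (kv.1 ∈ pvHits idx3 cs ↔ pvOverlap cs kv.2 = true))
    (h2sw : ∀ kv ∈ p2, PySem.Str.startswith kv.1 "1" = false)
    (h2h : ∀ kv ∈ p2, ∀ cs, (kv.1 ∈ pvHits idx2 cs ↔ pvOverlap cs kv.2 = true))
    (p1 : List (String × List (Int × Int)))
    (h1sw : ∀ kv ∈ p1, PySem.Str.startswith kv.1 "1" = true) :
    ∀ (acc : List (String × List (String × List String))) (pA pB : PySem.Set String),
      pvRel pA pB →
      (p1.foldl (pvLoop1 p2 p3) (acc, pA)).1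
        = (p1.foldl (pvAltStep1 p2 p3 idx2 idx3) (acc, pB)).1
      ∧ pvRel (p1.foldl (pvLoop1 p2 p3) (acc, pA)).2
          (p1.foldl (pvAltStep1 p2 p3 idx2 idx3) (acc, pB)).2 := by
  induction p1 with
  | nil => intro acc pA pB hrel; exact ⟨rfl, hrel⟩
  | cons kv rest ih =>
    intro acc pA pB hrel
    have hsw1 := h1sw kv (List.mem_cons_self ..)
    have ih' := ih (fun x hx => h1sw x (List.mem_cons_of_mem _ hx))
    simp only [List.foldl_cons, pvLoop1, pvAltStep1]
    have hrel' : pvRel (PySem.Set.add pA kv.1) pB := pv_rel_add1 pA pB hrel kv.1 hsw1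
    obtain ⟨h1, h2⟩ := pv_middle_eq p3 idx3 kv.2 (pvHits idx2 kv.2) h3nd h3sw h3h p2 h2sw
      (fun x hx => h2h x hx kv.2) [] (PySem.Set.add pA kv.1) pB hrel'
    rw [h1]
    exact ih' _ _ _ h2

-- nodup keys of a filtered items list
lemma pv_filter_nodup (d : PySem.Dict String (List (Int × Int))) (f : String × List (Int × Int) → Bool)
    (hnd : (d.items.map (·.1)).Nodup) :
    ((d.items.filter f).map (·.1)).Nodup :=
  hnd.sublist (List.Sublist.map _ List.filter_sublist)

-- ===== VERDICT (by name: the statement is the Claim_ definition above) =====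
theorem build_location_hierarchy_spec : Claim_equal_build_location_hierarchy := by
  intro locations _
  unfold Spec_build_location_hierarchy build_location_hierarchy build_location_hierarchy_alt
  set d := PySem.Dict.ofList locations with hd
  set p1 := d.items.filter (fun kv => PySem.Str.startswith kv.1 "1") with hp1
  set p2 := d.items.filter (fun kv => PySem.Str.startswith kv.1 "2") with hp2
  set p3 := d.items.filter (fun kv => PySem.Str.startswith kv.1 "3") with hp3
  have hkeys : (d.items.map (·.1)).Nodup := PySem.Dict.nodup_keys_ofList locations
  have h2nd : (p2.map (·.1)).Nodup := pv_filter_nodup d _ hkeys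
  have h3nd : (p3.map (·.1)).Nodup := pv_filter_nodup d _ hkeys
  have h1sw : ∀ kv ∈ p1, PySem.Str.startswith kv.1 "1" = true := by
    intro kv hkv; exact (List.mem_filter.mp hkv).2
  have h2sw : ∀ kv ∈ p2, PySem.Str.startswith kv.1 "1" = false := by
    intro kv hkv
    have h2 := (List.mem_filter.mp hkv).2
    have := pv_sw_ne kv.1 '2' '1' (by simpa using h2) (by decide)
    simpa using this
  have h3sw : ∀ kv ∈ p3, PySem.Str.startswith kv.1 "1" = false := by
    intro kv hkv
    have h3 := (List.mem_filter.mp hkv).2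
    have := pv_sw_ne kv.1 '3' '1' (by simpa using h3) (by decide)
    simpa using this
  have h2h : ∀ kv ∈ p2, ∀ cs, (kv.1 ∈ pvHits (pvIndex p2) cs ↔ pvOverlap cs kv.2 = true) := by
    intro kv hkv cs; exact pv_hits_iff_overlap p2 h2nd kv hkv cs
  have h3h : ∀ kv ∈ p3, ∀ cs, (kv.1 ∈ pvHits (pvIndex p3) cs ↔ pvOverlap cs kv.2 = true) := by
    intro kv hkv cs; exact pv_hits_iff_overlap p3 h3nd kv hkv cs
  have hrel0 : pvRel PySem.Set.empty PySem.Set.empty := fun s _ => Iff.rfl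
  exact (pv_top_eq p2 p3 (pvIndex p2) (pvIndex p3) h3nd h3sw h3h h2sw h2h p1 h1sw
    [] PySem.Set.empty PySem.Set.empty hrel0).1
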